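-- pv_equiv track=rewrite | github.com/devbis/zstack_3.0.2 | z-stack_3.0.2/Tools/sdcc/remap_banked_hex.py | _uses_contiguous_banked_layout
-- ===== SOURCE A (Python) =====
-- def _uses_contiguous_banked_layout(
--     memory: dict[int, int],
--     root_end: int,
--     windows: list[tuple[int, int]],
-- ) -> bool:
--     if not windows:
--         return False
--     for address in memory:
--         if address <= root_end:
--             continue
--         if any(start <= address <= end for start, end in windows):
--             continue
--         return True
--     return False
-- ===== SOURCE B (Python) =====
-- def _uses_contiguous_banked_layout(
--     memory: dict[int, int],
--     root_end: int,
--     windows: list[tuple[int, int]],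
-- ) -> bool:
--     if not windows:
--         return False
--     # Canonical index: drop degenerate windows, sort by start, merge overlaps.
--     merged = []
--     for s, e in sorted((w for w in windows if w[0] <= w[1]), key=lambda w: w[0]):
--         if merged and s <= merged[-1][1]:
--             ls, le = merged[-1]
--             merged[-1] = (ls, max(le, e))
--         else:
--             merged.append((s, e))
--     for address in memory:
--         if address <= root_end:
--             continue
--         # binary search: lo = number of merged intervals with start <= address
--         lo, hi = 0, len(merged)
--         while lo < hi:
--             mid = (lo + hi) // 2
--             if merged[mid][0] <= address:
--                 lo = mid + 1
--             else:
--                 hi = mid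
--         if lo == 0 or address > merged[lo - 1][1]:
--             return True
--     return False
-- ===== Notes on version B (the rewrite author's own statement) =====
-- stated objective: alternative
-- what changed: B preprocesses the windows once into a sorted, merged list of disjoint intervals and locates each address's unique candidate interval by binary search, instead of A's linear scan of all windows per address.
import Mathlib
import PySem

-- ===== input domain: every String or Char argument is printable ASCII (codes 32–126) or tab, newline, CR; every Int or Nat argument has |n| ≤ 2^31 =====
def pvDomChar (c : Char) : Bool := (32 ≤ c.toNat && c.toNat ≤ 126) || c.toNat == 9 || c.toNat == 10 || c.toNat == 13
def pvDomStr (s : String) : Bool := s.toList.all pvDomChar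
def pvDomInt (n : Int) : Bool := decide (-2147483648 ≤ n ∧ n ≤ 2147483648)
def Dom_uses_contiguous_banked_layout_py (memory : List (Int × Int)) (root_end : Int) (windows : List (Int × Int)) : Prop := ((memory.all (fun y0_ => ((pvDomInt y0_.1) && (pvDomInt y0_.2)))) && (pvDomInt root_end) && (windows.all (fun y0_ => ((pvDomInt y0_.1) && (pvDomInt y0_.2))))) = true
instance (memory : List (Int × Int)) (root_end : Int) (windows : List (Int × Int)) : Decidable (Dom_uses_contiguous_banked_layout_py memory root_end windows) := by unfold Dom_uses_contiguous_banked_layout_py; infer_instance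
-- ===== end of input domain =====

-- B replaces A's per-address linear scan of all windows by a one-time sort-and-merge of
-- the windows into disjoint intervals plus a per-address binary search (objective: alternative).

-- ===== PORT A =====
-- the 'for address in memory' loop of A (dict iteration = iteration over the keys)
def pvLoopA (root_end : Int) (windows : List (Int × Int)) : List (Int × Int) → Bool
  | [] => false
  | (address, _) :: rest =>
    if address ≤ root_end then pvLoopA root_end windows rest
    else if windows.any (fun w => decide (w.1 ≤ address) && decide (address ≤ w.2)) then
      pvLoopA root_end windows rest
    else true

def uses_contiguous_banked_layout_py (memory : List (Int × Int)) (root_end : Int) (windows : List (Int × Int)) : Bool :=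
  if windows.isEmpty then false
  else pvLoopA root_end windows memory

-- ===== PORT B =====
-- one step of B's merge loop; the accumulator keeps the merged list in REVERSED order
-- (head = Python's merged[-1]), reversed once at the end
def pvMergeStep (acc : List (Int × Int)) (w : Int × Int) : List (Int × Int) :=
  match acc with
  | (ls, le) :: t => if w.1 ≤ le then (ls, max le w.2) :: t else w :: (ls, le) :: t
  | [] => [w]

-- B's preprocessing: drop degenerate windows, sort by start, merge overlaps
def pvMerged (windows : List (Int × Int)) : List (Int × Int) :=
  ((PySem.List.sorted (windows.filter (fun w => decide (w.1 ≤ w.2))) (fun w => w.1) false).foldl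
      pvMergeStep []).reverse

-- B's hand-written binary search: number of intervals of `l` with start ≤ address
def pvBisect (l : List (Int × Int)) (address : Int) (lo hi : Nat) : Nat :=
  if _h : lo < hi then
    let mid := (lo + hi) / 2
    if (l.getD mid (0, 0)).1 ≤ address then pvBisect l address (mid + 1) hi
    else pvBisect l address lo mid
  else lo
termination_by hi - lo
decreasing_by all_goals omega

-- B's 'for address in memory' loop over the preprocessed interval list
def pvLoopB (root_end : Int) (merged : List (Int × Int)) : List (Int × Int) → Bool
  | [] => false
  | (address, _) :: rest =>
    if address ≤ root_end then pvLoopB root_end merged rest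
    else
      let lo := pvBisect merged address 0 merged.length
      if lo = 0 ∨ (merged.getD (lo - 1) (0, 0)).2 < address then true
      else pvLoopB root_end merged rest

def uses_contiguous_banked_layout_py_alt (memory : List (Int × Int)) (root_end : Int) (windows : List (Int × Int)) : Bool :=
  if windows.isEmpty then false
  else pvLoopB root_end (pvMerged windows) memory

-- ===== PRECONDITION & SPEC =====
def Spec_uses_contiguous_banked_layout_py (memory : List (Int × Int)) (root_end : Int) (windows : List (Int × Int)) (out : Bool) : Prop := out = uses_contiguous_banked_layout_py_alt memory root_end windows
instance (memory : List (Int × Int)) (root_end : Int) (windows : List (Int × Int)) (out : Bool) : Decidable (Spec_uses_contiguous_banked_layout_py memory root_end windows out) := by unfold Spec_uses_contiguous_banked_layout_py; infer_instance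

-- ===== CLAIM (what is proved, stated in full; the proofs are below) =====
def Claim_equal_uses_contiguous_banked_layout_py : Prop := ∀ (memory : List (Int × Int)) (root_end : Int) (windows : List (Int × Int)), Dom_uses_contiguous_banked_layout_py memory root_end windows → Spec_uses_contiguous_banked_layout_py memory root_end windows (uses_contiguous_banked_layout_py memory root_end windows)

-- ===== LEMMAS AND PROOFS =====

-- "some window of l covers a"
def pvCov (l : List (Int × Int)) (a : Int) : Prop := ∃ w ∈ l, w.1 ≤ a ∧ a ≤ w.2

lemma pvBisect_spec (l : List (Int × Int)) (a : Int)
    (hmono : ∀ i j : Nat, i ≤ j → j < l.length → (l.getD i (0, 0)).1 ≤ (l.getD j (0, 0)).1) :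
    ∀ (n lo hi : Nat), hi - lo ≤ n → hi ≤ l.length → lo ≤ hi →
    (∀ j, j < lo → (l.getD j (0, 0)).1 ≤ a) →
    (∀ j, hi ≤ j → j < l.length → a < (l.getD j (0, 0)).1) →
    pvBisect l a lo hi ≤ l.length ∧
    (∀ j, j < pvBisect l a lo hi → (l.getD j (0, 0)).1 ≤ a) ∧
    (∀ j, pvBisect l a lo hi ≤ j → j < l.length → a < (l.getD j (0, 0)).1) := by
  intro n
  induction n with
  | zero =>
    intro lo hi hn hhi hlo hbelow habove
    have : ¬ lo < hi := by omega
    rw [pvBisect, dif_neg this]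
    exact ⟨by omega, hbelow, by intro j hj hjl; exact habove j (by omega) hjl⟩
  | succ n ih =>
    intro lo hi hn hhi hlo hbelow habove
    rw [pvBisect]
    by_cases h : lo < hi
    · rw [dif_pos h]
      simp only
      by_cases hm : (l.getD ((lo + hi) / 2) (0, 0)).1 ≤ a
      · rw [if_pos hm]
        refine ih ((lo + hi) / 2 + 1) hi (by omega) hhi (by omega) ?_ habove
        intro j hj
        exact le_trans (hmono j ((lo + hi) / 2) (by omega) (by omega)) hm
      · rw [if_neg hm]
        refine ih lo ((lo + hi) / 2) (by omega) (by omega) (by omega) hbelow ?_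
        intro j hj hjl
        exact lt_of_lt_of_le (by omega : a < (l.getD ((lo + hi) / 2) (0, 0)).1)
          (hmono ((lo + hi) / 2) j hj hjl)
    · rw [dif_neg h]
      exact ⟨by omega, hbelow, by intro j hj hjl; exact habove j (by omega) hjl⟩

-- merge-loop invariant: validity, reverse-sorted disjointness, and coverage preservation
lemma pvMerge_inv (a : Int) :
    ∀ (S acc : List (Int × Int)),
    S.Pairwise (fun x y => x.1 ≤ y.1) → (∀ w ∈ S, w.1 ≤ w.2) →
    (∀ w ∈ acc, w.1 ≤ w.2) →
    acc.Pairwise (fun x y => y.2 < x.1) →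
    (∀ h ∈ acc.head?, ∀ w ∈ S, h.1 ≤ w.1) →
    (∀ w ∈ S.foldl pvMergeStep acc, w.1 ≤ w.2) ∧
    (S.foldl pvMergeStep acc).Pairwise (fun x y => y.2 < x.1) ∧
    (pvCov (S.foldl pvMergeStep acc) a ↔ pvCov acc a ∨ pvCov S a) := by
  intro S
  induction S with
  | nil =>
    intro acc _ _ hv hp _
    refine ⟨hv, hp, ?_⟩
    simp [pvCov]
  | cons w rest ih =>
    intro acc hS hSv hv hp hhead
    obtain ⟨s, e⟩ := w
    have hse : s ≤ e := hSv (s, e) (List.mem_cons_self ..)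
    have hSrest : rest.Pairwise (fun x y => x.1 ≤ y.1) := (List.pairwise_cons.mp hS).2
    have hsrest : ∀ w ∈ rest, s ≤ w.1 := (List.pairwise_cons.mp hS).1
    have hSvrest : ∀ w ∈ rest, w.1 ≤ w.2 := fun w hw => hSv w (List.mem_cons_of_mem _ hw)
    simp only [List.foldl_cons]
    match hacc : acc with
    | [] =>
      have := ih [(s, e)] hSrest hSvrest
        (by intro w hw; simp at hw; subst hw; exact hse)
        (by simp) (by simpa using hsrest)
      simp only [pvMergeStep] at *
      refine ⟨this.1, this.2.1, ?_⟩
      rw [this.2.2]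
      constructor
      · rintro (h | h)
        · right
          obtain ⟨w, hw, hc⟩ := h
          simp at hw; subst hw
          exact ⟨(s, e), List.mem_cons_self .., hc⟩
        · right
          obtain ⟨w, hw, hc⟩ := h
          exact ⟨w, List.mem_cons_of_mem _ hw, hc⟩
      · rintro (h | h)
        · exact absurd h (by simp [pvCov])
        · obtain ⟨w, hw, hc⟩ := h
          rcases List.mem_cons.mp hw with h1 | h1
          · subst h1; exact Or.inl ⟨(s, e), by simp, hc⟩
          · exact Or.inr ⟨w, h1, hc⟩
    | (ls, le) :: t =>
      have hlsle : ls ≤ le := hv (ls, le) (List.mem_cons_self ..)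
      have hls_s : ls ≤ s := hhead (ls, le) rfl (s, e) (List.mem_cons_self ..)
      have ht_lt : ∀ y ∈ t, y.2 < ls := fun y hy => (List.pairwise_cons.mp hp).1 y hy
      have htv : ∀ w ∈ t, w.1 ≤ w.2 := fun w hw => hv w (List.mem_cons_of_mem _ hw)
      have htp : t.Pairwise (fun x y => y.2 < x.1) := (List.pairwise_cons.mp hp).2
      by_cases hcase : s ≤ le
      · simp only [pvMergeStep, if_pos hcase]
        have := ih ((ls, max le e) :: t) hSrest hSvrest
          (by
            intro w hw
            rcases List.mem_cons.mp hw with h1 | h1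
            · subst h1; simp; left; omega
            · exact htv w h1)
          (by
            rw [List.pairwise_cons]
            exact ⟨ht_lt, htp⟩)
          (by
            intro h hh w hw
            simp at hh; subst hh
            exact le_trans hls_s (hsrest w hw))
        refine ⟨this.1, this.2.1, ?_⟩
        rw [this.2.2]
        have hcov_eq : pvCov ((ls, max le e) :: t) a ↔
            pvCov ((ls, le) :: t) a ∨ (s ≤ a ∧ a ≤ e) := by
          simp only [pvCov, List.mem_cons]
          constructor
          · rintro ⟨w, hw, hc⟩
            rcases hw with h1 | h1
            · subst h1
              simp at hc
              rcases hc with ⟨h2, h3⟩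
              by_cases ha : a ≤ le
              · exact Or.inl ⟨(ls, le), Or.inl rfl, h2, ha⟩
              · refine Or.inr ⟨?_, by omega⟩
                omega
            · exact Or.inl ⟨w, Or.inr h1, hc⟩
          · rintro (⟨w, hw, hc⟩ | ⟨h1, h2⟩)
            · rcases hw with h3 | h3
              · subst h3
                exact ⟨(ls, max le e), Or.inl rfl, hc.1, le_trans hc.2 (le_max_left _ _)⟩
              · exact ⟨w, Or.inr h3, hc⟩
            · exact ⟨(ls, max le e), Or.inl rfl, le_trans hls_s h1, le_trans h2 (le_max_right _ _)⟩
        rw [hcov_eq]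
        simp only [pvCov, List.mem_cons]
        constructor
        · rintro ((h | h) | h)
          · exact Or.inl h
          · exact Or.inr ⟨(s, e), Or.inl rfl, h⟩
          · obtain ⟨w, hw, hc⟩ := h
            exact Or.inr ⟨w, Or.inr hw, hc⟩
        · rintro (h | ⟨w, hw, hc⟩)
          · exact Or.inl (Or.inl h)
          · rcases hw with h1 | h1
            · subst h1; exact Or.inl (Or.inr hc)
            · exact Or.inr ⟨w, h1, hc⟩
      · simp only [pvMergeStep, if_neg hcase]
        push Not at hcase
        have := ih ((s, e) :: (ls, le) :: t) hSrest hSvrest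
          (by
            intro w hw
            rcases List.mem_cons.mp hw with h1 | h1
            · subst h1; exact hse
            · exact hv w h1)
          (by
            rw [List.pairwise_cons]
            refine ⟨?_, hp⟩
            intro y hy
            rcases List.mem_cons.mp hy with h1 | h1
            · subst h1; exact hcase
            · exact lt_of_lt_of_le (lt_of_lt_of_le (ht_lt y h1) hlsle) (le_of_lt hcase))
          (by
            intro h hh w hw
            simp at hh; subst hh
            exact hsrest w hw)
        refine ⟨this.1, this.2.1, ?_⟩
        rw [this.2.2]
        simp only [pvCov, List.mem_cons]
        constructor
        · rintro (⟨w, hw, hc⟩ | h)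
          · rcases hw with h1 | h1
            · subst h1; exact Or.inr ⟨(s, e), Or.inl rfl, hc⟩
            · exact Or.inl ⟨w, h1, hc⟩
          · obtain ⟨w, hw, hc⟩ := h
            exact Or.inr ⟨w, Or.inr hw, hc⟩
        · rintro (⟨w, hw, hc⟩ | ⟨w, hw, hc⟩)
          · exact Or.inl ⟨w, Or.inr hw, hc⟩
          · rcases hw with h1 | h1
            · subst h1; exact Or.inl ⟨(s, e), Or.inl rfl, hc⟩
            · exact Or.inr ⟨w, h1, hc⟩

-- properties of the canonical interval list
lemma pvMerged_props (windows : List (Int × Int)) (a : Int) :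
    (∀ w ∈ pvMerged windows, w.1 ≤ w.2) ∧
    (pvMerged windows).Pairwise (fun x y => x.2 < y.1) ∧
    (pvCov (pvMerged windows) a ↔ pvCov windows a) := by
  set f := windows.filter (fun w => decide (w.1 ≤ w.2)) with hf
  set S := PySem.List.sorted f (fun w => w.1) false with hS
  have hSsort : S.Pairwise (fun x y => x.1 ≤ y.1) := PySem.List.sorted_pairwise ..
  have hSv : ∀ w ∈ S, w.1 ≤ w.2 := by
    intro w hw
    have := (PySem.List.mem_sorted _ _ _ _).mp hw
    rw [hf] at this
    simpa using (List.of_mem_filter this)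
  have hinv := pvMerge_inv a S [] hSsort hSv (by simp) (by simp) (by simp)
  unfold pvMerged
  rw [← hS]
  refine ⟨by simpa using hinv.1, by simpa [List.pairwise_reverse] using hinv.2.1, ?_⟩
  have hrev : pvCov (S.foldl pvMergeStep []).reverse a ↔ pvCov (S.foldl pvMergeStep []) a := by
    simp [pvCov]
  rw [hrev, hinv.2.2]
  simp only [pvCov, List.not_mem_nil]
  constructor
  · rintro (⟨w, hw, _⟩ | ⟨w, hw, hc⟩)
    · simp at hw
    · refine ⟨w, ?_, hc⟩
      have := (PySem.List.mem_sorted _ _ _ _).mp hw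
      rw [hf] at this
      exact List.mem_of_mem_filter this
  · rintro ⟨w, hw, hc⟩
    refine Or.inr ⟨w, ?_, hc⟩
    rw [hS]
    apply (PySem.List.mem_sorted _ _ _ _).mpr
    rw [hf]
    exact List.mem_filter.mpr ⟨hw, by simp; omega⟩

-- B's per-address test agrees with A's linear scan of all windows
lemma pvCovB_iff (windows : List (Int × Int)) (a : Int) :
    (pvBisect (pvMerged windows) a 0 (pvMerged windows).length = 0 ∨
      ((pvMerged windows).getD (pvBisect (pvMerged windows) a 0 (pvMerged windows).length - 1) (0, 0)).2 < a) ↔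
    ¬ pvCov windows a := by
  obtain ⟨hv, hp, hcov⟩ := pvMerged_props windows a
  set M := pvMerged windows with hM
  have hpget : ∀ i j : Nat, i < j → j < M.length → (M.getD i (0, 0)).2 < (M.getD j (0, 0)).1 := by
    intro i j hij hj
    have := List.pairwise_iff_getElem.mp hp i j (by omega) hj hij
    rwa [List.getD_eq_getElem _ _ (by omega), List.getD_eq_getElem _ _ hj]
  have hvget : ∀ i : Nat, i < M.length → (M.getD i (0, 0)).1 ≤ (M.getD i (0, 0)).2 := by
    intro i hi
    rw [List.getD_eq_getElem _ _ hi]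
    exact hv _ (List.getElem_mem hi)
  have hmono : ∀ i j : Nat, i ≤ j → j < M.length → (M.getD i (0, 0)).1 ≤ (M.getD j (0, 0)).1 := by
    intro i j hij hj
    rcases Nat.lt_or_ge i j with h | h
    · exact le_trans (hvget i (by omega)) (le_of_lt (hpget i j h hj))
    · have : i = j := by omega
      subst this; rfl
  have hspec := pvBisect_spec M a hmono M.length 0 M.length (by omega) (le_refl _) (by omega)
    (by omega) (by intro j hj hjl; omega)
  set r := pvBisect M a 0 M.length with hr
  obtain ⟨hrlen, hbelow, habove⟩ := hspec
  have hcovM : pvCov M a ↔ ∃ j : Nat, j < M.length ∧ (M.getD j (0, 0)).1 ≤ a ∧ a ≤ (M.getD j (0, 0)).2 := by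
    simp only [pvCov]
    constructor
    · rintro ⟨w, hw, hc⟩
      obtain ⟨j, hj, hjw⟩ := List.mem_iff_getElem.mp hw
      exact ⟨j, hj, by rw [List.getD_eq_getElem _ _ hj, hjw]; exact hc⟩
    · rintro ⟨j, hj, hc⟩
      rw [List.getD_eq_getElem _ _ hj] at hc
      exact ⟨M[j], List.getElem_mem hj, hc⟩
  rw [← hcov, hcovM]
  constructor
  · rintro (h0 | hgt) ⟨j, hj, hc1, hc2⟩
    · exact absurd hc1 (not_le.mpr (habove j (by omega) hj))
    · rcases Nat.lt_or_ge j r with hjr | hjr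
      · rcases Nat.lt_or_ge j (r - 1) with hjr1 | hjr1
        · have : r - 1 < M.length := by
            rcases Nat.eq_zero_or_pos r with h | h
            · omega
            · omega
          have := hpget j (r - 1) hjr1 this
          have hst := hbelow (r - 1) (by omega)
          omega
        · have : j = r - 1 := by omega
          subst this; omega
      · exact absurd hc1 (not_le.mpr (habove j hjr hj))
  · intro hnone
    by_contra hcon
    push Not at hcon
    obtain ⟨hr0, hle⟩ := hcon
    exact hnone ⟨r - 1, by omega, hbelow (r - 1) (by omega), hle⟩

-- the two memory loops agree
lemma pvLoop_eq (root_end : Int) (windows : List (Int × Int)) :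
    ∀ memory : List (Int × Int),
    pvLoopA root_end windows memory = pvLoopB root_end (pvMerged windows) memory := by
  intro memory
  induction memory with
  | nil => rfl
  | cons kv rest ih =>
    obtain ⟨address, v⟩ := kv
    simp only [pvLoopA, pvLoopB]
    by_cases h1 : address ≤ root_end
    · rw [if_pos h1, if_pos h1, ih]
    · rw [if_neg h1, if_neg h1]
      have hcov := pvCovB_iff windows address
      by_cases h2 : pvCov windows address
      · have hA : windows.any (fun w => decide (w.1 ≤ address) && decide (address ≤ w.2)) = true := by
          simp only [List.any_eq_true, Bool.and_eq_true, decide_eq_true_eq]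
          exact h2
        rw [if_pos hA, if_neg (by rw [hcov]; exact not_not_intro h2), ih]
      · have hA : ¬ (windows.any (fun w => decide (w.1 ≤ address) && decide (address ≤ w.2)) = true) := by
          simp only [List.any_eq_true, Bool.and_eq_true, decide_eq_true_eq]
          exact h2
        rw [if_neg hA, if_pos (hcov.mpr h2)]

-- ===== VERDICT (by name: the statement is the Claim_ definition above) =====
theorem uses_contiguous_banked_layout_py_spec : Claim_equal_uses_contiguous_banked_layout_py := by
  intro memory root_end windows _
  unfold Spec_uses_contiguous_banked_layout_py
  unfold uses_contiguous_banked_layout_py uses_contiguous_banked_layout_py_alt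
  by_cases h : windows.isEmpty
  · rw [if_pos h, if_pos h]
  · rw [if_neg h, if_neg h]
    exact pvLoop_eq root_end windows memory
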